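-- pv_equiv track=rewrite | github.com/alex-abrams711/synapse | src/synapse_cli/parsers/schema_generator.py | _group_status_by_field
-- ===== SOURCE A (Python) =====
-- from collections import defaultdict
-- from typing import Dict, List, Tuple, Optional
--
-- def _group_status_by_field(
--     status_lines: List[Tuple[str, str]]
-- ) -> Dict[str, List[str]]:
--     """
--     Group status values by field name.
--
--     Args:
--         status_lines: List of (field, value) tuples
--
--     Returns:
--         Dict mapping field names to sorted list of unique values
--     """
--     status_by_field = defaultdict(set)
--
--     for field, value in status_lines:
--         status_by_field[field].add(value)
--
--     # Convert to sorted lists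
--     return {
--         field: sorted(list(values))
--         for field, values in status_by_field.items()
--     }
-- ===== SOURCE B (Python) =====
-- def _group_status_by_field(status_lines):
--     """Group status values by field: global sort by value, then one linear
--     grouping pass with consecutive dedup (no per-field sets or per-field sorts)."""
--     result = {field: [] for field, _ in status_lines}
--     for field, value in sorted(status_lines, key=lambda fv: fv[1]):
--         lst = result[field]
--         if not lst or lst[-1] != value:
--             lst.append(value)
--     return result
-- ===== Notes on version B (the rewrite author's own statement) =====
-- stated objective: alternative
-- what changed: Replaces the defaultdict-of-sets build followed by a per-field sort of each set with a single global sort of all (field,value) pairs by value plus one linear grouping pass that appends with consecutive dedup into pre-registered per-field lists.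
import Mathlib
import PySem

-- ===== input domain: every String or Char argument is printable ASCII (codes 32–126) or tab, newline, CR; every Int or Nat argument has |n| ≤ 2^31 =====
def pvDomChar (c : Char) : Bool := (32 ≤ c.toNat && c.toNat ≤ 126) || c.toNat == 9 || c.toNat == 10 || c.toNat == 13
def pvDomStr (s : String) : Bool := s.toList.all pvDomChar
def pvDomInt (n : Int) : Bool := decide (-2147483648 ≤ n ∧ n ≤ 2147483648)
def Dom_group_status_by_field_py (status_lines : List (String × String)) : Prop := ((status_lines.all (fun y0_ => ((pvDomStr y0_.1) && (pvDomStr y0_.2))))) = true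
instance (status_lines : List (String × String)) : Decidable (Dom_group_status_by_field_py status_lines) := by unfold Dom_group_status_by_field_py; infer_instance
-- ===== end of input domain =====

-- B replaces A's per-field sets + per-field sorts by one global sort by value and a single
-- consecutive-dedup grouping pass (objective: alternative algorithm, similar cost).

-- ===== PORT A =====
-- defaultdict(set); status_by_field[field].add(value) is modify with default empty set
def group_status_by_field_py (status_lines : List (String × String)) : List (String × List String) :=
  let status_by_field : PySem.Dict String (PySem.Set String) :=
    status_lines.foldl (fun d p => d.modify p.1 PySem.Set.empty (fun s => PySem.Set.add s p.2)) PySem.Dict.empty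
  status_by_field.items.map (fun p => (p.1, PySem.List.sorted p.2 (fun x => x) false))

-- ===== PORT B =====
-- result = {field: [] for field, _ in status_lines}; then the grouping pass.
-- 'lst = result[field]; if not lst or lst[-1] != value: lst.append(value)' is ported as an
-- unconditional modify (the key is always present, so the default [] is never consulted: exact).
def group_status_by_field_py_alt (status_lines : List (String × String)) : List (String × List String) :=
  let init : PySem.Dict String (List String) :=
    status_lines.foldl (fun d p => d.insert p.1 []) PySem.Dict.empty
  let result : PySem.Dict String (List String) :=
    (PySem.List.sorted status_lines (fun fv => fv.2) false).foldl
      (fun d p => d.modify p.1 [] (fun lst => if lst.getLast? ≠ some p.2 then lst ++ [p.2] else lst))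
      init
  result.items

-- ===== PRECONDITION & SPEC =====
def Spec_group_status_by_field_py (status_lines : List (String × String)) (out : List (String × List String)) : Prop := out = group_status_by_field_py_alt status_lines
instance (status_lines : List (String × String)) (out : List (String × List String)) : Decidable (Spec_group_status_by_field_py status_lines out) := by unfold Spec_group_status_by_field_py; infer_instance

-- ===== CLAIM (what is proved, stated in full; the proofs are below) =====
def Claim_equal_group_status_by_field_py : Prop := ∀ (status_lines : List (String × String)), Dom_group_status_by_field_py status_lines → Spec_group_status_by_field_py status_lines (group_status_by_field_py status_lines)

-- ===== LEMMAS AND PROOFS =====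

-- value at key c of a fold that modifies key p.1 with a function of p.2
theorem getD_foldl_modify_gen {ν : Type} (l : List (String × String)) (d : PySem.Dict String ν)
    (d0 : ν) (g : ν → String → ν) (c : String) :
    (l.foldl (fun d p => d.modify p.1 d0 (fun s => g s p.2)) d).getD c d0
      = (l.filter (fun p => p.1 == c)).foldl (fun s p => g s p.2) (d.getD c d0) := by
  induction l generalizing d with
  | nil => rfl
  | cons p t ih =>
    simp only [List.foldl_cons, List.filter_cons]
    by_cases h : p.1 = c
    · subst h
      simp [ih, PySem.Dict.getD_modify_self]
    · have hb : (p.1 == c) = false := by simp [h]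
      simp only [hb, Bool.false_eq_true, if_false]
      rw [ih, PySem.Dict.getD_modify_of_ne d d0 (fun s => g s p.2) (Ne.symm h)]

-- members of a strictly sorted list are ≤ its last element
theorem mem_le_getLast (acc : List String) (hacc : acc.Pairwise (· < ·))
    (l : String) (hl : acc.getLast? = some l) : ∀ y ∈ acc, y ≤ l := by
  intro y hy
  obtain ⟨ys, rfl⟩ := List.getLast?_eq_some_iff.mp hl
  rw [List.pairwise_append] at hacc
  rcases List.mem_append.mp hy with h | h
  · exact le_of_lt (hacc.2.2 y h l (List.mem_singleton_self l))
  · rcases List.mem_singleton.mp h with rfl; exact le_rfl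

-- invariant of the consecutive-dedup fold over a sorted value list
theorem dedup_fold_inv (vs : List String) :
    ∀ acc : List String, vs.Pairwise (· ≤ ·) → acc.Pairwise (· < ·) →
    (∀ y ∈ acc, ∀ v ∈ vs, y ≤ v) →
    (vs.foldl (fun lst v => if lst.getLast? ≠ some v then lst ++ [v] else lst) acc).Pairwise (· < ·)
    ∧ ∀ x, (x ∈ vs.foldl (fun lst v => if lst.getLast? ≠ some v then lst ++ [v] else lst) acc ↔ x ∈ acc ∨ x ∈ vs) := by
  induction vs with
  | nil => intro acc _ hacc _; simpa using hacc
  | cons v t ih =>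
    intro acc hvs hacc hle
    simp only [List.foldl_cons]
    have hvt : t.Pairwise (· ≤ ·) := hvs.of_cons
    have hvle : ∀ w ∈ t, v ≤ w := fun w hw => (List.pairwise_cons.mp hvs).1 w hw
    by_cases hc : acc.getLast? = some v
    · -- value equals the last appended one: skip it
      have hvmem : v ∈ acc := List.mem_of_getLast? hc
      simp only [hc, ne_eq, not_true_eq_false, if_false]
      have hle' : ∀ y ∈ acc, ∀ w ∈ t, y ≤ w := fun y hy w hw =>
        le_trans (hle y hy v List.mem_cons_self) (hvle w hw)
      obtain ⟨h1, h2⟩ := ih acc hvt hacc hle'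
      refine ⟨h1, fun x => ?_⟩
      rw [h2]
      constructor
      · rintro (h | h)
        · exact Or.inl h
        · exact Or.inr (List.mem_cons_of_mem _ h)
      · rintro (h | h)
        · exact Or.inl h
        · rcases List.mem_cons.mp h with h | h
          · exact Or.inl (h ▸ hvmem)
          · exact Or.inr h
    · -- append v
      have hlt : ∀ y ∈ acc, y < v := by
        intro y hy
        rcases lt_or_eq_of_le (hle y hy v List.mem_cons_self) with h | h
        · exact h
        · exfalso
          cases hg : acc.getLast? with
          | none =>
            rw [List.getLast?_eq_none_iff.mp hg] at hy
            simp at hy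
          | some l =>
            have h1 : y ≤ l := mem_le_getLast acc hacc l hg y hy
            have h2 : l ≤ v := hle l (List.mem_of_getLast? hg) v List.mem_cons_self
            have h3 : l = v := le_antisymm h2 (h ▸ h1)
            exact hc (by rw [hg, h3])
      have hacc' : (acc ++ [v]).Pairwise (· < ·) := by
        rw [List.pairwise_append]
        exact ⟨hacc, List.pairwise_singleton _ _, fun y hy w hw => by
          rcases List.mem_singleton.mp hw with rfl; exact hlt y hy⟩
      have hle' : ∀ y ∈ acc ++ [v], ∀ w ∈ t, y ≤ w := by
        intro y hy w hw
        rcases List.mem_append.mp hy with h | h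
        · exact le_trans (hle y h v List.mem_cons_self) (hvle w hw)
        · rcases List.mem_singleton.mp h with rfl; exact hvle w hw
      simp only [hc, ne_eq, not_false_eq_true, if_true]
      obtain ⟨h1, h2⟩ := ih (acc ++ [v]) hvt hacc' hle'
      refine ⟨h1, fun x => ?_⟩
      rw [h2]
      simp only [List.mem_append, List.mem_cons]
      tauto

-- adding only existing members leaves a set unchanged
theorem foldl_add_of_subset (l : List String) : ∀ s : List String, (∀ x ∈ l, x ∈ s) →
    l.foldl PySem.Set.add s = s := by
  induction l with
  | nil => intro s _; rfl
  | cons x t ih =>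
    intro s h
    have hx : PySem.Set.add s x = s := by
      unfold PySem.Set.add
      simp [PySem.Set.contains, h x List.mem_cons_self]
    rw [List.foldl_cons, hx]
    exact ih s (fun y hy => h y (List.mem_cons_of_mem _ hy))

-- the initial {field: [] …} dict maps every key to []
theorem getD_init_nil (l : List (String × String)) :
    ∀ (d : PySem.Dict String (List String)) (k : String), d.getD k [] = [] →
    (l.foldl (fun d p => d.insert p.1 ([] : List String)) d).getD k [] = [] := by
  induction l with
  | nil => intro d k h; exact h
  | cons p t ih =>
    intro d k h
    rw [List.foldl_cons]
    refine ih _ k ?_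
    rw [PySem.Dict.getD_insert]
    split_ifs <;> simp [h]

-- per-field agreement: sorted(set(values)) equals the consecutive-dedup of the sorted pass
theorem per_field (status_lines : List (String × String)) (c : String) :
    PySem.List.sorted
        ((status_lines.filter (fun p => p.1 == c)).foldl (fun s p => PySem.Set.add s p.2) PySem.Set.empty)
        (fun x => x) false
      = ((PySem.List.sorted status_lines (fun fv => fv.2) false).filter (fun p => p.1 == c)).foldl
          (fun lst p => if lst.getLast? ≠ some p.2 then lst ++ [p.2] else lst) [] := by
  have hmapF : (status_lines.filter (fun p => p.1 == c)).foldl (fun s p => PySem.Set.add s p.2) PySem.Set.empty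
      = PySem.Set.ofList ((status_lines.filter (fun p => p.1 == c)).map Prod.snd) := by
    rw [PySem.Set.ofList_eq_foldl, List.foldl_map]
    rfl
  have hmapS : ((PySem.List.sorted status_lines (fun fv => fv.2) false).filter (fun p => p.1 == c)).foldl
        (fun lst p => if lst.getLast? ≠ some p.2 then lst ++ [p.2] else lst) []
      = (((PySem.List.sorted status_lines (fun fv => fv.2) false).filter (fun p => p.1 == c)).map Prod.snd).foldl
        (fun lst v => if lst.getLast? ≠ some v then lst ++ [v] else lst) [] := by
    rw [List.foldl_map]
  set vsS := ((PySem.List.sorted status_lines (fun fv => fv.2) false).filter (fun p => p.1 == c)).map Prod.snd with hvsS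
  set vsF := (status_lines.filter (fun p => p.1 == c)).map Prod.snd with hvsF
  have hpair : vsS.Pairwise (· ≤ ·) := by
    refine List.pairwise_map.mpr ?_
    exact (PySem.List.sorted_pairwise status_lines (fun fv => fv.2)).sublist List.filter_sublist
  have hperm : vsS.Perm vsF :=
    (((PySem.List.sorted_perm status_lines (fun fv => fv.2) false).filter _)).map Prod.snd
  obtain ⟨hD1, hD2⟩ := dedup_fold_inv vsS [] hpair List.Pairwise.nil (by simp)
  rw [hmapF, hmapS]
  refine PySem.List.sorted_eq_of_perm_of_pairwise_lt _ _ _ ?_ ?_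
  · refine (List.perm_ext_iff_of_nodup (hD1.imp ne_of_lt) (PySem.Set.nodup_ofList _)).mpr ?_
    intro a
    rw [hD2 a, PySem.Set.mem_ofList]
    simp only [List.not_mem_nil, false_or]
    exact ⟨fun h => hperm.mem_iff.mp h, fun h => hperm.mem_iff.mpr h⟩
  · exact hD1

-- ===== VERDICT (by name: the statement is the Claim_ definition above) =====
theorem group_status_by_field_py_spec : Claim_equal_group_status_by_field_py := by
  intro status_lines _
  unfold Spec_group_status_by_field_py group_status_by_field_py group_status_by_field_py_alt
  simp only []
  set dA := status_lines.foldl (fun d p => d.modify p.1 PySem.Set.empty (fun s => PySem.Set.add s p.2)) PySem.Dict.empty with hdA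
  set init := status_lines.foldl (fun d p => d.insert p.1 ([] : List String)) PySem.Dict.empty with hinit
  set dB := (PySem.List.sorted status_lines (fun fv => fv.2) false).foldl
      (fun d p => d.modify p.1 [] (fun lst => if lst.getLast? ≠ some p.2 then lst ++ [p.2] else lst)) init with hdB
  -- keys
  have hkA : dA.keys = PySem.Set.update PySem.Dict.empty.keys (status_lines.map Prod.fst) :=
    PySem.Dict.keys_foldl_modify_key status_lines Prod.fst PySem.Set.empty (fun _ p s => PySem.Set.add s p.2) _
  have hkI : init.keys = PySem.Set.update PySem.Dict.empty.keys (status_lines.map Prod.fst) :=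
    PySem.Dict.keys_foldl_insert_key status_lines Prod.fst (fun _ _ => []) _
  have hkB : dB.keys = init.keys := by
    have h := PySem.Dict.keys_foldl_modify_key (PySem.List.sorted status_lines (fun fv => fv.2) false)
      Prod.fst ([] : List String)
      (fun _ p lst => if lst.getLast? ≠ some p.2 then lst ++ [p.2] else lst) init
    rw [hdB, h]
    refine foldl_add_of_subset _ _ ?_
    intro x hx
    have hx' : x ∈ status_lines.map Prod.fst :=
      ((PySem.List.sorted_perm status_lines (fun fv => fv.2) false).map Prod.fst).mem_iff.mp hx
    rw [hkI, PySem.Dict.keys_empty]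
    show x ∈ PySem.Set.update [] (status_lines.map Prod.fst)
    rw [show PySem.Set.update ([] : PySem.Set String) (status_lines.map Prod.fst)
          = PySem.Set.ofList (status_lines.map Prod.fst) from (PySem.Set.ofList_eq_foldl _)]
    exact (PySem.Set.mem_ofList _ x).mpr hx'
  have hnA : dA.keys.Nodup := by
    rw [hdA]
    exact PySem.Dict.nodup_keys_foldl_modify_key status_lines Prod.fst PySem.Set.empty
      (fun _ p s => PySem.Set.add s p.2) _ (by simp [PySem.Dict.keys_empty])
  have hnI : init.keys.Nodup := by
    rw [hinit]
    exact PySem.Dict.nodup_keys_foldl_insert_key status_lines Prod.fst (fun _ _ => []) _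
      (by simp [PySem.Dict.keys_empty])
  have hnB : dB.keys.Nodup := by
    rw [hdB]
    exact PySem.Dict.nodup_keys_foldl_modify_key _ Prod.fst ([] : List String)
      (fun _ p lst => if lst.getLast? ≠ some p.2 then lst ++ [p.2] else lst) init hnI
  -- items as maps over keys
  rw [PySem.Dict.items_eq_map_keys dA hnA PySem.Set.empty,
      PySem.Dict.items_eq_map_keys dB hnB ([] : List String),
      List.map_map, hkB, hkI, hkA]
  refine List.map_congr_left ?_
  intro k _
  simp only [Function.comp_apply]
  refine Prod.ext rfl ?_
  show PySem.List.sorted (dA.getD k PySem.Set.empty) (fun x => x) false = dB.getD k []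
  have hA : dA.getD k PySem.Set.empty
      = (status_lines.filter (fun p => p.1 == k)).foldl (fun s p => PySem.Set.add s p.2) PySem.Set.empty := by
    rw [hdA, getD_foldl_modify_gen status_lines PySem.Dict.empty PySem.Set.empty PySem.Set.add k,
        PySem.Dict.getD_empty]
  have hB : dB.getD k []
      = ((PySem.List.sorted status_lines (fun fv => fv.2) false).filter (fun p => p.1 == k)).foldl
          (fun lst p => if lst.getLast? ≠ some p.2 then lst ++ [p.2] else lst) [] := by
    rw [hdB, getD_foldl_modify_gen _ init ([] : List String)
          (fun lst v => if lst.getLast? ≠ some v then lst ++ [v] else lst) k,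
        getD_init_nil status_lines PySem.Dict.empty k (PySem.Dict.getD_empty _ _)]
  rw [hA, hB]
  exact per_field status_lines k
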